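-- pv_equiv track=rewrite | github.com/MSGronda/neuro-tpe | src/signal_processing.py | partition_dataset
-- ===== SOURCE A (Python) =====
-- EEG_LENGTH = 38253
--
-- def partition_dataset(dataset: [{}], classes: [], clip_size: int):
--     partitioned_dataset = []
--     partitioned_classes = []
--
--     n_partitions = int(EEG_LENGTH / clip_size)
--
--     for data_by_channel, data_class in zip(dataset, classes):
--         partitions = [{} for _ in range(n_partitions)]
--         partition_classes = [data_class for _ in range(n_partitions)]
--
--         for p in range(n_partitions):
--             for key, value in data_by_channel.items():      # O(n^3): un crimen contra la humanidad
--                 if p != n_partitions - 1: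
--                     partitions[p][key] = value[p * clip_size: (p+1) * clip_size]
--                 else:
--                     partitions[p][key] = value[p * clip_size:]
--
--         partitioned_dataset.extend(partitions)
--         partitioned_classes.extend(partition_classes)
--
--     return partitioned_dataset, partitioned_classes
-- ===== SOURCE B (Python) =====
-- EEG_LENGTH = 38253
--
-- def _split(v, clip_size, n_partitions):
--     # peel clip_size-prefixes n_partitions-1 times; the remainder is the last chunk
--     chunks = []
--     for _ in range(n_partitions - 1):
--         chunks.append(v[:clip_size])
--         v = v[clip_size:]
--     chunks.append(v)
--     return chunks
--
-- def partition_dataset(dataset: [{}], classes: [], clip_size: int):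
--     n_partitions = int(EEG_LENGTH / clip_size)
--     partitioned_dataset = []
--     partitioned_classes = []
--
--     for data_by_channel, data_class in zip(dataset, classes):
--         if n_partitions > 0:
--             # key-major: split each channel's signal once, then transpose into per-partition dicts
--             columns = {key: _split(value, clip_size, n_partitions)
--                        for key, value in data_by_channel.items()}
--             for p in range(n_partitions):
--                 partitioned_dataset.append({key: col[p] for key, col in columns.items()})
--                 partitioned_classes.append(data_class)
--
--     return partitioned_dataset, partitioned_classes
-- ===== Notes on version B (the rewrite author's own statement) =====
-- stated objective: alternative
-- what changed: B splits every channel's signal once, key-major, by repeatedly peeling clip_size-long prefixes (the remainder being the last chunk) into a columns dict, then transposes the chunk columns into the per-partition dicts, instead of A's partition-major loop that re-slices each channel at computed offsets for every partition index with an in-loop last-partition branch.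
import Mathlib
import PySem

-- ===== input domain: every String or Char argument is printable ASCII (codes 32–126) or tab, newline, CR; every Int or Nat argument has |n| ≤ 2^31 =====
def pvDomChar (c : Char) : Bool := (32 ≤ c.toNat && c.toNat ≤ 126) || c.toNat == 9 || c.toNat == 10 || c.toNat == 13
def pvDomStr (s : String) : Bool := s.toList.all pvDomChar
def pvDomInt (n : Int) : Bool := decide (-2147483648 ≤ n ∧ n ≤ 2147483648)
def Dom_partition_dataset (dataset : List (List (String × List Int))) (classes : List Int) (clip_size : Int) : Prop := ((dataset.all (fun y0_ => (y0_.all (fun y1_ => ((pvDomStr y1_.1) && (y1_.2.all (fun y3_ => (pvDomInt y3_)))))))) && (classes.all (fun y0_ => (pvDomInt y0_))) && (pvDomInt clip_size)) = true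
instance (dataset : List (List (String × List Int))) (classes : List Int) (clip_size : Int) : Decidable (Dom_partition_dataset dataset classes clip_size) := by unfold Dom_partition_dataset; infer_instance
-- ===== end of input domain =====

-- B splits each channel's signal ONCE, key-major, by successively peeling clip_size-prefixes
-- (last chunk = the remainder), then transposes the chunk columns into per-partition dicts —
-- instead of A's partition-major pass re-slicing every channel per partition index with an
-- in-loop last-partition branch; same cost, a different traversal and decomposition.
--
-- `int(38253 / clip_size)` (float division then truncation) is ported as Lean's `38253 / clip_size`
-- (Int.ediv): for a nonnegative dividend ediv truncates toward zero, and for 0 < |clip_size| ≤ 2^31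
-- the double-precision quotient's rounding error (< 2^-38) is smaller than the distance (≥ 2^-31)
-- from 38253/clip_size to any integer it does not equal, so truncation is unaffected.

-- ===== PORT A =====
-- loop body of A's `for data_by_channel, data_class in zip(...)`; `partitions` renders A's list of
-- n pre-allocated dicts where slot p is written exactly once by the `for p in range(n_partitions)` loop
def pvAStep (n clip : Int) (acc : (List (List (String × List Int))) × List Int)
    (dc : List (String × List Int) × Int) : (List (List (String × List Int))) × List Int :=
  let partitions : List (List (String × List Int)) :=
    (PySem.List.pyRange 0 n 1).map (fun p =>
      (dc.1.foldl (fun (d : PySem.Dict String (List Int)) kv =>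
        if p ≠ n - 1 then
          d.insert kv.1 (PySem.List.slice kv.2 (some (p * clip)) (some ((p + 1) * clip)))
        else
          d.insert kv.1 (PySem.List.slice kv.2 (some (p * clip)) none)) PySem.Dict.empty).items)
  let partition_classes : List Int := (PySem.List.pyRange 0 n 1).map (fun _ => dc.2)
  (acc.1 ++ partitions, acc.2 ++ partition_classes)

def partition_dataset (dataset : List (List (String × List Int))) (classes : List Int) (clip_size : Int) : (List (List (String × List Int))) × List Int :=
  (dataset.zip classes).foldl (pvAStep (38253 / clip_size) clip_size) ([], [])

-- ===== PORT B =====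
-- Source B's `_split`: peel clip-size prefixes n-1 times, the remainder is the last chunk
def pvSplit (v : List Int) (clip n : Int) : List (List Int) :=
  let st := (PySem.List.pyRange 0 (n - 1) 1).foldl
    (fun (st : List (List Int) × List Int) _ =>
      (st.1 ++ [PySem.List.slice st.2 none (some clip)], PySem.List.slice st.2 (some clip) none))
    ([], v)
  st.1 ++ [st.2]

-- loop body of B's `for data_by_channel, data_class in zip(...)`
def pvBStep (n clip : Int) (acc : (List (List (String × List Int))) × List Int)
    (dc : List (String × List Int) × Int) : (List (List (String × List Int))) × List Int :=
  if 0 < n then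
    let columns : PySem.Dict String (List (List Int)) :=
      dc.1.foldl (fun d kv => d.insert kv.1 (pvSplit kv.2 clip n)) PySem.Dict.empty
    (PySem.List.pyRange 0 n 1).foldl (fun acc2 p =>
      (acc2.1 ++ [(columns.items.foldl (fun (d : PySem.Dict String (List Int)) kc =>
          d.insert kc.1 (PySem.List.pyGetD kc.2 p [])) PySem.Dict.empty).items],
       acc2.2 ++ [dc.2])) acc
  else acc

def partition_dataset_alt (dataset : List (List (String × List Int))) (classes : List Int) (clip_size : Int) : (List (List (String × List Int))) × List Int :=
  (dataset.zip classes).foldl (pvBStep (38253 / clip_size) clip_size) ([], [])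

-- ===== PRECONDITION & SPEC =====
-- Pre_ excludes only clip_size = 0, where both A and B raise ZeroDivisionError.
def Pre_partition_dataset (dataset : List (List (String × List Int))) (classes : List Int) (clip_size : Int) : Prop := clip_size ≠ 0
instance (dataset : List (List (String × List Int))) (classes : List Int) (clip_size : Int) : Decidable (Pre_partition_dataset dataset classes clip_size) := by unfold Pre_partition_dataset; infer_instance

def pvWitness_partition_dataset : (List (List (String × List Int))) × List Int × Int :=
  ([[("c1", [1, 2, 3, 4, 5]), ("c2", [6, 7, 8, 9, 10])]], [1], 20000)

def Spec_partition_dataset (dataset : List (List (String × List Int))) (classes : List Int) (clip_size : Int) (out : (List (List (String × List Int))) × List Int) : Prop := out = partition_dataset_alt dataset classes clip_size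
instance (dataset : List (List (String × List Int))) (classes : List Int) (clip_size : Int) (out : (List (List (String × List Int))) × List Int) : Decidable (Spec_partition_dataset dataset classes clip_size out) := by unfold Spec_partition_dataset; infer_instance

-- ===== CLAIM (what is proved, stated in full; the proofs are below) =====
def Claim_equal_partition_dataset : Prop := ∀ (dataset : List (List (String × List Int))) (classes : List Int) (clip_size : Int), Dom_partition_dataset dataset classes clip_size → Pre_partition_dataset dataset classes clip_size → Spec_partition_dataset dataset classes clip_size (partition_dataset dataset classes clip_size)

-- ===== LEMMAS AND PROOFS =====

theorem pvItems_foldl_insert_val {V W : Type} (l : List (String × V)) (f : V → W)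
    (d : PySem.Dict String V) (d' : PySem.Dict String W)
    (h : d'.items = d.items.map (fun q => (q.1, f q.2))) :
    (l.foldl (fun d kv => d.insert kv.1 (f kv.2)) d').items
      = (l.foldl (fun d kv => d.insert kv.1 kv.2) d).items.map (fun q => (q.1, f q.2)) := by
  induction l generalizing d d' with
  | nil => simpa using h
  | cons x xs ih =>
    simp only [List.foldl_cons]
    apply ih
    have hcont : d'.contains x.1 = d.contains x.1 := by
      rw [PySem.Dict.contains_eq_decide_mem_keys, PySem.Dict.contains_eq_decide_mem_keys]
      simp only [PySem.Dict.keys, h, List.map_map, Function.comp_def]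
      rfl
    by_cases hc : d.contains x.1 = true
    · rw [PySem.Dict.items_insert_of_contains _ _ (by rw [hcont]; exact hc),
        PySem.Dict.items_insert_of_contains _ _ hc, h, List.map_map, List.map_map]
      refine List.map_congr_left (fun q _ => ?_)
      by_cases hq : q.1 = x.1 <;> simp [hq]
    · rw [PySem.Dict.items_insert_of_not_contains _ _ (by rw [hcont]; simpa using hc),
        PySem.Dict.items_insert_of_not_contains _ _ (by simpa using hc), h]
      simp

-- the peel loop, characterised
theorem pvSplitLoop (clip : Int) (hc : 0 ≤ clip) (m : Nat) (acc : List (List Int)) (w : List Int) :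
    (PySem.List.pyRange 0 (m : Int) 1).foldl
      (fun (st : List (List Int) × List Int) _ =>
        (st.1 ++ [PySem.List.slice st.2 none (some clip)], PySem.List.slice st.2 (some clip) none))
      (acc, w)
    = (acc ++ (List.range m).map (fun j => (w.drop (j * clip.toNat)).take clip.toNat),
       w.drop (m * clip.toNat)) := by
  induction m generalizing acc w with
  | zero => simp [PySem.List.pyRange_one_eq_nil]
  | succ k ih =>
    rw [show ((k + 1 : Nat) : Int) = (k : Int) + 1 by push_cast; ring,
      PySem.List.pyRange_one_succ_right (by positivity), List.foldl_append]
    rw [ih]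
    simp only [List.foldl_cons, List.foldl_nil, PySem.List.slice_to _ hc, PySem.List.slice_from _ hc,
      List.take_drop, List.drop_drop, List.range_succ, List.map_append, List.map_cons, List.map_nil,
      List.append_assoc, Prod.mk.injEq]
    refine ⟨trivial, ?_⟩
    congr 1
    ring

theorem pvChunk (v : List Int) (clip n p : Int) (hc : 0 < clip) (hn : 0 < n)
    (hp0 : 0 ≤ p) (hpn : p < n) :
    (if p ≠ n - 1 then PySem.List.slice v (some (p * clip)) (some ((p + 1) * clip))
     else PySem.List.slice v (some (p * clip)) none)
    = PySem.List.pyGetD (pvSplit v clip n) p [] := by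
  obtain ⟨c', rfl⟩ : ∃ c' : Nat, clip = (c' : Int) := ⟨clip.toNat, (Int.toNat_of_nonneg hc.le).symm⟩
  obtain ⟨k, rfl⟩ : ∃ k : Nat, p = (k : Int) := ⟨p.toNat, (Int.toNat_of_nonneg hp0).symm⟩
  obtain ⟨m, hm⟩ : ∃ m : Nat, n - 1 = (m : Int) := ⟨(n - 1).toNat, (Int.toNat_of_nonneg (by omega)).symm⟩
  unfold pvSplit
  rw [hm, pvSplitLoop _ (by positivity)]
  simp only [List.nil_append]
  have hkm : k ≤ m := by omega
  rw [PySem.List.pyGetD_natCast, Int.toNat_natCast]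
  by_cases hk : k < m
  · have hne : (k : Int) ≠ (m : Int) := by omega
    rw [if_pos hne, List.getD_append _ _ _ _ (by simpa using hk),
      PySem.List.getD_map_range _ _ _ _ hk,
      show ((k : Int) + 1) * (c' : Int) = (((k + 1) * c' : Nat) : Int) by push_cast; ring,
      show (k : Int) * (c' : Int) = ((k * c' : Nat) : Int) by push_cast; ring,
      PySem.List.slice_natCast]
    congr 1
    rw [Nat.succ_mul]
    omega
  · have hkm' : k = m := by omega
    have hne : ¬ ((k : Int) ≠ (m : Int)) := by omega
    rw [if_neg hne, List.getD_append_right _ _ _ _ (by simp [hkm']),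
      show (k : Int) * (c' : Int) = ((k * c' : Nat) : Int) by push_cast; ring,
      PySem.List.slice_from_natCast]
    simp [hkm']


theorem pvB_foldl_pair {α β γ : Type} (l : List β) (f : β → α) (c : γ) (acc : List α × List γ) :
    l.foldl (fun a2 se => (a2.1 ++ [f se], a2.2 ++ [c])) acc
      = (acc.1 ++ l.map f, acc.2 ++ l.map (fun _ => c)) := by
  induction l generalizing acc with
  | nil => simp
  | cons x xs ih => simp [ih]

theorem pvStep_eq (clip : Int) (hc : clip ≠ 0) :
    pvAStep (38253 / clip) clip = pvBStep (38253 / clip) clip := by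
  funext acc dc
  set n : Int := 38253 / clip with hn_def
  by_cases hn : 0 < n
  · have hcp : 0 < clip := by
      rcases lt_trichotomy clip 0 with h | h | h
      · exfalso
        have : n ≤ 0 := by
          rw [hn_def]
          apply Int.ediv_nonpos_of_nonneg_of_nonpos <;> omega
        omega
      · exact absurd h hc
      · exact h
    unfold pvAStep pvBStep
    rw [if_pos hn, pvB_foldl_pair]
    simp only [Prod.mk.injEq]
    refine ⟨?_, trivial⟩
    congr 1
    refine List.map_congr_left (fun p hp => ?_)
    obtain ⟨hp0, hpn⟩ := PySem.List.mem_pyRange_one.mp hp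
    -- A's per-pair inner fold: lift the p-branch out of the insert
    have hfunA : (fun (d : PySem.Dict String (List Int)) (kv : String × List Int) =>
        if p ≠ n - 1 then
          d.insert kv.1 (PySem.List.slice kv.2 (some (p * clip)) (some ((p + 1) * clip)))
        else d.insert kv.1 (PySem.List.slice kv.2 (some (p * clip)) none))
        = (fun d kv => d.insert kv.1 (if p ≠ n - 1 then
            PySem.List.slice kv.2 (some (p * clip)) (some ((p + 1) * clip))
          else PySem.List.slice kv.2 (some (p * clip)) none)) := by
      funext d kv; split <;> rfl
    rw [hfunA, pvItems_foldl_insert_val dc.1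
      (fun v => if p ≠ n - 1 then PySem.List.slice v (some (p * clip)) (some ((p + 1) * clip))
        else PySem.List.slice v (some (p * clip)) none)
      PySem.Dict.empty PySem.Dict.empty rfl]
    -- B's per-p dict: a fold over columns.items, whose keys are Nodup
    have hnodup : ((dc.1.foldl (fun (d : PySem.Dict String (List (List Int))) kv =>
        d.insert kv.1 (pvSplit kv.2 clip n)) PySem.Dict.empty).items.map Prod.fst).Nodup := by
      have := PySem.Dict.nodup_keys_foldl_insert_key dc.1 Prod.fst
        (fun _ kv => pvSplit kv.2 clip n) PySem.Dict.empty (by simp)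
      simpa [PySem.Dict.keys] using this
    rw [PySem.Dict.items_foldl_insert_fresh _ Prod.fst _ _ (by simp) hnodup,
      pvItems_foldl_insert_val dc.1 (fun v => pvSplit v clip n)
        PySem.Dict.empty PySem.Dict.empty rfl]
    simp only [List.map_map]
    refine List.map_congr_left (fun q _ => ?_)
    simp only [Function.comp_def]
    exact congrArg (fun z => (q.1, z)) (pvChunk q.2 clip n p hcp hn hp0 hpn)
  · unfold pvAStep pvBStep
    rw [if_neg hn, PySem.List.pyRange_one_eq_nil (by omega)]
    simp

-- ===== VERDICT (by name: the statement is the Claim_ definition above) =====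
theorem partition_dataset_spec : Claim_equal_partition_dataset := by
  intro dataset classes clip_size _ hpre
  unfold Spec_partition_dataset partition_dataset partition_dataset_alt
  rw [pvStep_eq clip_size hpre]
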